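-- pv_equiv track=rewrite | github.com/lukasrieger-dev/adventofcode2020 | 18-aoc-2020/day18.py | set_parenthesis_left_to_right
-- ===== SOURCE A (Python) =====
-- def set_parenthesis_left_to_right(sub_exercise):
--     tmp = ['(']
--     cnt = 0
--     for c in sub_exercise:
--         if c in '+*':
--             tmp.append(')' + c)
--             cnt += 1
--         else:
--             tmp.append(c)
--     tmp = ''.join([cnt * '('] + tmp) + ')'
--     return tmp
-- ===== SOURCE B (Python) =====
-- def set_parenthesis_left_to_right(sub_exercise):
--     # Recursive, right-to-left: find the LAST operator, recursively
--     # parenthesize everything before it, and wrap the whole in parentheses.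
--     for i in range(len(sub_exercise) - 1, -1, -1):
--         if sub_exercise[i] in '+*':
--             return ('(' + set_parenthesis_left_to_right(sub_exercise[:i])
--                     + sub_exercise[i] + sub_exercise[i+1:] + ')')
--     return '(' + sub_exercise + ')'
-- ===== Notes on version B (the rewrite author's own statement) =====
-- stated objective: alternative
-- what changed: A's single left-to-right loop that accumulates string pieces while counting operators is replaced by right-to-left recursion: find the last operator, recursively parenthesize the prefix before it, append the operator and the trailing operand, and wrap in parentheses (base case: no operator, wrap the string).
import Mathlib
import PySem

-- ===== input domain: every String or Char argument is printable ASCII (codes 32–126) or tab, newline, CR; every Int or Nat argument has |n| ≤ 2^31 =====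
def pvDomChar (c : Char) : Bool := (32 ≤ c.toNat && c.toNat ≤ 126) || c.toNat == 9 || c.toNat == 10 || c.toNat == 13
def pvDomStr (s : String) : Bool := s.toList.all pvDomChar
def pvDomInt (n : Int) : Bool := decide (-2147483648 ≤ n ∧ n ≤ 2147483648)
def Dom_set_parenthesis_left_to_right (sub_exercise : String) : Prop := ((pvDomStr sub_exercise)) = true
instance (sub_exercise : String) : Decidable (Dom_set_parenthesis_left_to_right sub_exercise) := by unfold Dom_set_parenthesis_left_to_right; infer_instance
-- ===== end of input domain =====

-- B replaces A's single left-to-right accumulation loop by right-to-left recursion on the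
-- last operator; objective: alternative (same output, different algorithmic decomposition).

-- ===== PORT A =====
def set_parenthesis_left_to_right (sub_exercise : String) : String :=
  -- tmp = ['(']; cnt = 0; for c in sub_exercise: if c in '+*': tmp.append(')'+c); cnt += 1 else: tmp.append(c)
  let st := sub_exercise.toList.foldl
    (fun (st : List String × Int) (c : Char) =>
      if PySem.Str.isIn (String.ofList [c]) "+*" then
        (st.1 ++ [String.ofList [')', c]], st.2 + 1)   -- ')' + c : single-char concatenation, hand-ported, exact
      else
        (st.1 ++ [String.ofList [c]], st.2))
    (["("], (0 : Int))
  -- ''.join([cnt * '('] + tmp) + ')'  — cnt * '(' hand-ported as replicate (cnt ≥ 0 always holds);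
  -- the trailing  + ')'  is written as one more part of the empty-separator join, which is exact
  PySem.Str.join "" (([String.ofList (List.replicate st.2.toNat '(')] ++ st.1) ++ [")"])

-- ===== PORT B =====
-- Source B's test  sub_exercise[i] in '+*'  on the single character at i; exact for one char.
def pvIsOp (c : Char) : Bool := c == '+' || c == '*'

-- Source B's backwards index scan  for i in range(len(s)-1, -1, -1): if s[i] in '+*'  together with
-- the slices s[:i] and s[i+1:]: returns (s[:i], s[i], s[i+1:]) for the LAST operator position i,
-- none when no character is an operator. Structural recursion over the list is exact: a match in
-- the tail (a later index) takes precedence over the head.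
def pvFindLastOp : List Char → Option (List Char × Char × List Char)
  | [] => none
  | c :: t =>
    match pvFindLastOp t with
    | some (p, o, s) => some (c :: p, o, s)
    | none => if pvIsOp c then some ([], c, t) else none

lemma pvFindLastOp_length : ∀ {l : List Char} {p : List Char} {o : Char} {s : List Char},
    pvFindLastOp l = some (p, o, s) → p.length < l.length := by
  intro l
  induction l with
  | nil => intro p o s h; simp [pvFindLastOp] at h
  | cons c t ih =>
      intro p o s h
      simp only [pvFindLastOp] at h
      cases hf : pvFindLastOp t with
      | some x =>
          obtain ⟨p', o', s'⟩ := x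
          rw [hf] at h
          simp only [Option.some.injEq, Prod.mk.injEq] at h
          obtain ⟨hp, -, -⟩ := h
          subst hp
          have := ih hf
          simpa using Nat.succ_lt_succ this
      | none =>
          rw [hf] at h
          by_cases hc : pvIsOp c = true
          · simp only [hc, if_true, Option.some.injEq, Prod.mk.injEq] at h
            obtain ⟨hp, -, -⟩ := h
            subst hp; simp
          · simp [hc] at h

-- the recursion of Source B:  '(' + f(s[:i]) + s[i] + s[i+1:] + ')'   /   '(' + s + ')'
def pvAltGo (l : List Char) : List Char :=
  match h : pvFindLastOp l with
  | none => '(' :: l ++ [')']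
  | some (p, o, s) => '(' :: pvAltGo p ++ o :: s ++ [')']
termination_by l.length
decreasing_by exact pvFindLastOp_length h

def set_parenthesis_left_to_right_alt (sub_exercise : String) : String :=
  String.ofList (pvAltGo sub_exercise.toList)

-- ===== PRECONDITION & SPEC =====
def Spec_set_parenthesis_left_to_right (sub_exercise : String) (out : String) : Prop := out = set_parenthesis_left_to_right_alt sub_exercise
instance (sub_exercise : String) (out : String) : Decidable (Spec_set_parenthesis_left_to_right sub_exercise out) := by unfold Spec_set_parenthesis_left_to_right; infer_instance

-- ===== CLAIM (what is proved, stated in full; the proofs are below) =====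
def Claim_equal_set_parenthesis_left_to_right : Prop := ∀ (sub_exercise : String), Dom_set_parenthesis_left_to_right sub_exercise → Spec_set_parenthesis_left_to_right sub_exercise (set_parenthesis_left_to_right sub_exercise)

-- ===== LEMMAS AND PROOFS =====

/-- The per-character expansion A performs. -/
def pvPiece (c : Char) : List Char :=
  if c = '+' then [')', '+'] else if c = '*' then [')', '*'] else [c]

/-- A's operator test, characterised. -/
lemma pv_isIn_char (c : Char) :
    (PySem.Str.isIn (String.ofList [c]) "+*") = pvIsOp c := by
  have h : (PySem.Str.isIn (String.ofList [c]) "+*" = true) ↔ (c = '+' ∨ c = '*') := by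
    rw [PySem.Str.isIn_eq, String.toList_ofList]
    rw [show ("+*" : String).toList = ['+', '*'] from rfl]
    rw [PySem.Chars.isIn_iff_infix, List.singleton_infix_iff]
    simp
  by_cases h1 : c = '+'
  · subst h1; rw [h.mpr (Or.inl rfl)]; simp [pvIsOp]
  · by_cases h2 : c = '*'
    · subst h2; rw [h.mpr (Or.inr rfl)]; simp [pvIsOp]
    · have hf : PySem.Str.isIn (String.ofList [c]) "+*" ≠ true := fun hh => by
        rcases h.mp hh with h' | h'
        · exact h1 h'
        · exact h2 h'
      rw [Bool.eq_false_iff.mpr hf]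
      simp [pvIsOp, h1, h2]

/-- A's loop, characterised: it appends one piece per character and counts the operators. -/
lemma pv_foldA (l : List Char) : ∀ (tmp : List String) (cnt : Int),
    l.foldl
      (fun (st : List String × Int) (c : Char) =>
        if PySem.Str.isIn (String.ofList [c]) "+*" then
          (st.1 ++ [String.ofList [')', c]], st.2 + 1)
        else
          (st.1 ++ [String.ofList [c]], st.2))
      (tmp, cnt)
      = (tmp ++ l.map (fun c => String.ofList (pvPiece c)),
         cnt + (l.countP pvIsOp : Int)) := by
  induction l with
  | nil => intro tmp cnt; simp
  | cons c t ih =>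
      intro tmp cnt
      rw [List.foldl_cons, pv_isIn_char]
      by_cases h1 : c = '+'
      · subst h1
        rw [if_pos (by simp [pvIsOp])]
        rw [ih]
        simp [pvPiece, pvIsOp, List.countP_cons]
        omega
      · by_cases h2 : c = '*'
        · subst h2
          rw [if_pos (by simp [pvIsOp])]
          rw [ih]
          simp [pvPiece, pvIsOp, List.countP_cons]
          omega
        · rw [if_neg (by simp [pvIsOp, h1, h2])]
          rw [ih]
          simp [pvPiece, pvIsOp, h1, h2, List.countP_cons]

/-- An empty-separator join is a flatten. -/
lemma pv_join_empty (parts : List (List Char)) :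
    PySem.Chars.join [] parts = parts.flatten := by
  induction parts with
  | nil => simp [PySem.Chars.join_nil]
  | cons p rest ih =>
      cases rest with
      | nil => simp [PySem.Chars.join_singleton]
      | cons q r =>
          rw [PySem.Chars.join_cons_cons, ih]
          simp

lemma pv_piece_of_not_op {c : Char} (h : pvIsOp c = false) : pvPiece c = [c] := by
  simp only [pvIsOp, Bool.or_eq_false_iff, beq_eq_false_iff_ne, ne_eq] at h
  simp [pvPiece, h.1, h.2]

lemma pv_piece_of_op {c : Char} (h : pvIsOp c = true) : pvPiece c = [')', c] := by
  simp only [pvIsOp, Bool.or_eq_true, beq_iff_eq] at h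
  rcases h with h | h <;> subst h <;> simp [pvPiece]

/-- When the backward scan finds no operator, nothing in the list is an operator. -/
lemma pv_none_noOp : ∀ {l : List Char}, pvFindLastOp l = none → ∀ c ∈ l, pvIsOp c = false := by
  intro l
  induction l with
  | nil => intro _ c hc; simp at hc
  | cons a t ih =>
      intro h c hc
      simp only [pvFindLastOp] at h
      cases hf : pvFindLastOp t with
      | some x => rw [hf] at h; obtain ⟨p, o, s⟩ := x; simp at h
      | none =>
          rw [hf] at h
          by_cases ha : pvIsOp a = true
          · simp [ha] at h
          · rcases List.mem_cons.mp hc with rfl | hct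
            · simpa using ha
            · exact ih hf c hct

/-- When it finds one: the split is exact, it is an operator, and the suffix holds none. -/
lemma pv_some_split : ∀ {l p : List Char} {o : Char} {s : List Char},
    pvFindLastOp l = some (p, o, s) →
    l = p ++ o :: s ∧ pvIsOp o = true ∧ pvFindLastOp s = none := by
  intro l
  induction l with
  | nil => intro p o s h; simp [pvFindLastOp] at h
  | cons a t ih =>
      intro p o s h
      simp only [pvFindLastOp] at h
      cases hf : pvFindLastOp t with
      | some x =>
          obtain ⟨p', o', s'⟩ := x
          rw [hf] at h
          simp only [Option.some.injEq, Prod.mk.injEq] at h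
          obtain ⟨hp, ho, hs⟩ := h
          subst hp; subst ho; subst hs
          obtain ⟨h1, h2, h3⟩ := ih hf
          exact ⟨by simp [h1], h2, h3⟩
      | none =>
          rw [hf] at h
          by_cases ha : pvIsOp a = true
          · simp only [ha, if_true, Option.some.injEq, Prod.mk.injEq] at h
            obtain ⟨hp, ho, hs⟩ := h
            subst hp; subst ho; subst hs
            exact ⟨rfl, ha, hf⟩
          · simp [ha] at h

lemma pv_flatMap_noOp {l : List Char} (h : ∀ c ∈ l, pvIsOp c = false) :
    l.flatMap pvPiece = l := by
  induction l with
  | nil => simp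
  | cons a t ih =>
      rw [List.flatMap_cons, pv_piece_of_not_op (h a (by simp)),
        ih (fun c hc => h c (List.mem_cons_of_mem _ hc))]
      rfl

lemma pv_countP_noOp {l : List Char} (h : ∀ c ∈ l, pvIsOp c = false) :
    l.countP pvIsOp = 0 := by
  rw [List.countP_eq_zero]
  intro c hc
  simp [h c hc]

/-- B's recursion computes exactly A's shape: `cnt` opens, one more open, pieces, close. -/
lemma pvAltGo_eq (l : List Char) :
    pvAltGo l = List.replicate (l.countP pvIsOp) '(' ++ '(' :: l.flatMap pvPiece ++ [')'] := by
  induction l using pvAltGo.induct with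
  | case1 l h =>
      have hno := pv_none_noOp h
      rw [pvAltGo, h, pv_flatMap_noOp hno, pv_countP_noOp hno]
      simp
  | case2 l p o s h ih =>
      obtain ⟨hl, hop, hsnone⟩ := pv_some_split h
      rw [pvAltGo, h]
      dsimp only
      rw [ih]
      subst hl
      have hs := pv_flatMap_noOp (pv_none_noOp hsnone)
      rw [List.countP_append, List.countP_cons, hop, List.flatMap_append, List.flatMap_cons,
        pv_piece_of_op hop, hs, pv_countP_noOp (pv_none_noOp hsnone)]
      have hc : p.countP pvIsOp + (0 + if (true : Bool) = true then 1 else 0)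
          = p.countP pvIsOp + 1 := by simp
      rw [hc, List.replicate_succ]
      simp

-- ===== VERDICT (by name: the statement is the Claim_ definition above) =====
theorem set_parenthesis_left_to_right_spec : Claim_equal_set_parenthesis_left_to_right := by
  intro s _
  unfold Spec_set_parenthesis_left_to_right
  apply String.toList_inj.mp
  unfold set_parenthesis_left_to_right set_parenthesis_left_to_right_alt
  simp only [pv_foldA, PySem.Str.toList_join, String.toList_ofList]
  rw [show ("" : String).toList = [] from rfl]
  simp only [List.map_append, List.map_cons, List.map_nil, String.toList_ofList,
    show (")" : String).toList = [')'] from rfl,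
    show ("(" : String).toList = ['('] from rfl]
  rw [pv_join_empty, pvAltGo_eq]
  have htn : ((0 : Int) + (s.toList.countP pvIsOp : Int)).toNat = s.toList.countP pvIsOp := by
    omega
  rw [htn]
  simp [List.flatMap_def, Function.comp_def]
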